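-- pv_equiv track=rewrite | github.com/beimnet777/A2SV | Quality vs Quantity.py | is_pos
-- ===== SOURCE A (Python) =====
-- def is_pos(x):
--     x.sort()
--     l,r,l_sum,r_sum=0,len(x)-1,x[0],x[len(x)-1]
--     while l<r:
--         if l+1>len(x)-r and r_sum>l_sum:
--             return True
--         elif l+1<=len(x)-r:
--             l+=1
--             l_sum+=x[l]
--         elif l+1>len(x)-r and r_sum<=l_sum:
--             r-=1
--             r_sum+=x[r]
--     return
-- ===== SOURCE B (Python) =====
-- def is_pos(x):
--     # Like A, sorts x in place; equivalence is about the return value.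
--     # The gap (sum of k largest) - (sum of k+1 smallest) is non-decreasing in k
--     # on the sorted list, so it suffices to check the single k = (len(x)-1)//2.
--     x.sort()
--     k = (len(x) - 1) // 2
--     if k >= 1 and sum(x[-k:]) > sum(x[:k + 1]):
--         return True
--     return None
-- ===== Notes on version B (the rewrite author's own statement) =====
-- stated objective: simpler
-- what changed: A's two-pointer early-return scan over all candidate splits is replaced by a single closed-form check at k = (len(x)-1)//2: on the sorted list the gap (sum of k largest) - (sum of k+1 smallest) is non-decreasing in k, so only the largest admissible k needs testing.
-- crash fix: On the empty list A raises IndexError (x[0] after sort); B returns None. — e.g. on is_pos([]): A raises IndexError, B returns none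
import Mathlib
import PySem

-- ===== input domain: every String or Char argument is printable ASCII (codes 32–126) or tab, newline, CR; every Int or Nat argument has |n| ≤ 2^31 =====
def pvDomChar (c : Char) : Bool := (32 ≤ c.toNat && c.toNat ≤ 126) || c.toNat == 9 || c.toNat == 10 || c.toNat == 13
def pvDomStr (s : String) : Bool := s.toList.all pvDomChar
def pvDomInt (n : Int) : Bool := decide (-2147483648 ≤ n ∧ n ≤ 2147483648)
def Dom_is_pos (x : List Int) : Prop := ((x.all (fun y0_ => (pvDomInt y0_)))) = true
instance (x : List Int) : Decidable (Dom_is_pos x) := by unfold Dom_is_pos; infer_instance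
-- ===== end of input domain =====

-- B replaces A's two-pointer early-return scan by a single closed-form check at
-- k = (n-1)//2 (the gap is monotone in k on the sorted list): simpler.
-- Both A and B sort x in place; the equivalence proved is about the return value.

-- ===== PORT A =====
-- A's while-loop; indices l+1, r-1 are always in range while the loop runs, so
-- pyGetD is exact here.  The final `else` is Python's r_sum<=l_sum elif branch
-- (its condition is implied by the negations of the two branches above it).
def aloop (s : List Int) (n l r lsum rsum : Int) : Option Bool :=
  if _h : l < r then
    if l + 1 > n - r ∧ rsum > lsum then some true
    else if l + 1 ≤ n - r then
      aloop s n (l + 1) r (lsum + PySem.List.pyGetD s (l + 1) 0) rsum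
    else
      aloop s n l (r - 1) lsum (rsum + PySem.List.pyGetD s (r - 1) 0)
  else none
termination_by (r - l).toNat
decreasing_by all_goals omega

-- x[0] / x[len(x)-1]: in range under Pre_is_pos (x ≠ []), so pyGetD is exact.
def is_pos (x : List Int) : Option Bool :=
  let s := PySem.List.sorted x (fun v => v) false
  let n : Int := s.length
  aloop s n 0 (n - 1) (PySem.List.pyGetD s 0 0) (PySem.List.pyGetD s (n - 1) 0)

-- ===== PORT B =====
-- Source B: sort, k = (len(x)-1)//2, single comparison of sum(x[-k:]) vs sum(x[:k+1]).
def is_pos_alt (x : List Int) : Option Bool :=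
  let s := PySem.List.sorted x (fun v => v) false
  let k : Int := PySem.Int.floordiv ((s.length : Int) - 1) 2
  if 1 ≤ k ∧ (PySem.List.slice s (some (-k)) none).sum > (PySem.List.slice s none (some (k + 1))).sum
  then some true else none

-- ===== PRECONDITION & SPEC =====
-- A raises IndexError on the empty list (x[0]); nothing else is excluded.
def Pre_is_pos (x : List Int) : Prop := x ≠ []
instance (x : List Int) : Decidable (Pre_is_pos x) := by unfold Pre_is_pos; infer_instance
def pvWitness_is_pos : List Int := [3, 1, 2]

-- On the empty list A raises IndexError; B returns None.
def Raises_is_pos (x : List Int) : Prop := x = []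
instance (x : List Int) : Decidable (Raises_is_pos x) := by unfold Raises_is_pos; infer_instance
def pvRaiseWitness_is_pos : List Int := []
def pvRaiseWitnessOut_is_pos : Option Bool := none

def Spec_is_pos (x : List Int) (out : Option Bool) : Prop := out = is_pos_alt x
instance (x : List Int) (out : Option Bool) : Decidable (Spec_is_pos x out) := by unfold Spec_is_pos; infer_instance

-- ===== CLAIM =====
def Claim_equal_is_pos : Prop := ∀ (x : List Int), Dom_is_pos x → Pre_is_pos x → Spec_is_pos x (is_pos x)
def Claim_raises_is_pos : Prop := (∀ (x : List Int), Dom_is_pos x → Raises_is_pos x → ¬ Pre_is_pos x) ∧ (Dom_is_pos (pvRaiseWitness_is_pos) ∧ Raises_is_pos (pvRaiseWitness_is_pos) ∧ is_pos_alt (pvRaiseWitness_is_pos) = pvRaiseWitnessOut_is_pos)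

-- ===== LEMMAS AND PROOFS =====

-- prefix sum of the k+1 smallest, suffix sum of the k largest, on a list s
def preS (s : List Int) (k : Nat) : Int := (s.take (k + 1)).sum
def sufS (s : List Int) (k : Nat) : Int := (s.drop (s.length - k)).sum

-- pyGetD at an in-range index whose Int value is the Nat j
theorem pgI (s : List Int) (i : Int) (j : Nat) (hij : i = (j : Int)) (hj : j < s.length) :
    PySem.List.pyGetD s i 0 = s[j]'hj := by
  subst hij
  rw [PySem.List.pyGetD_natCast]
  exact List.getD_eq_getElem s 0 hj

theorem fd2 (m k : Int) : k ≤ PySem.Int.floordiv m 2 ↔ 2 * k ≤ m := by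
  rw [PySem.Int.le_floordiv_iff_mul_le (by norm_num : (0:Int) < 2)]
  omega

-- floordiv on the nonnegative (n:Int)-1 agrees with Nat division
theorem fdK (n : Nat) (h : 1 ≤ n) :
    PySem.Int.floordiv ((n : Int) - 1) 2 = (((n - 1) / 2 : Nat) : Int) := by
  have h1 : (n - 1) / 2 * 2 ≤ n - 1 := Nat.div_mul_le_self (n - 1) 2
  have h2 : n - 1 < 2 * ((n - 1) / 2 + 1) := Nat.lt_mul_div_succ _ (by omega)
  have h3 : (((n - 1) / 2 : Nat) : Int) ≤ PySem.Int.floordiv ((n : Int) - 1) 2 :=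
    (fd2 _ _).mpr (by omega)
  have h4 : ¬ (((n - 1) / 2 : Nat) : Int) + 1 ≤ PySem.Int.floordiv ((n : Int) - 1) 2 := by
    intro hc
    have := (fd2 ((n : Int) - 1) ((((n - 1) / 2 : Nat) : Int) + 1)).mp hc
    omega
  omega

-- the drop identity exposing the next-largest element
theorem drop_succ_eq (s : List Int) (k : Nat) (hk : 2 * k + 3 ≤ s.length) :
    s.drop (s.length - (k + 1)) = s[s.length - k - 1]'(by omega) :: s.drop (s.length - k) := by
  rw [show s.length - (k + 1) = s.length - k - 1 from by omega]
  rw [List.drop_eq_getElem_cons (by omega : s.length - k - 1 < s.length)]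
  rw [show s.length - k - 1 + 1 = s.length - k from by omega]

-- one monotonicity step of the gap sufS - preS on a getElem-monotone list
theorem diff_step (s : List Int) (k : Nat)
    (hmono : ∀ (p q : Nat) (_ : p < s.length) (hq : q < s.length), p ≤ q → s[p]'(by omega) ≤ s[q]'hq)
    (hk : 2 * (k + 1) ≤ s.length - 1) :
    sufS s k - preS s k ≤ sufS s (k + 1) - preS s (k + 1) := by
  have hn : 2 * k + 3 ≤ s.length := by omega
  have hp : k + 1 < s.length := by omega
  have hq : s.length - k - 1 < s.length := by omega
  have hpre : preS s (k + 1) = preS s k + s[k + 1]'hp := by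
    unfold preS
    exact List.sum_take_succ s (k + 1) hp
  have hsuf : sufS s (k + 1) = s[s.length - k - 1]'hq + sufS s k := by
    unfold sufS
    rw [drop_succ_eq s k hn, List.sum_cons]
  have hel : s[k + 1]'hp ≤ s[s.length - k - 1]'hq := hmono _ _ hp hq (by omega)
  omega

-- the gap is monotone: from any k up to j
theorem diff_mono (s : List Int) (k j : Nat)
    (hmono : ∀ (p q : Nat) (_ : p < s.length) (hq : q < s.length), p ≤ q → s[p]'(by omega) ≤ s[q]'hq)
    (hkj : k ≤ j) (hj : 2 * j ≤ s.length - 1) :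
    sufS s k - preS s k ≤ sufS s j - preS s j := by
  induction j with
  | zero =>
    have : k = 0 := by omega
    simp [this]
  | succ m ih =>
    rcases Nat.lt_or_ge k (m + 1) with hlt | hge
    · have h1 := ih (by omega) (by omega)
      have h2 := diff_step s m hmono (by omega)
      omega
    · have : k = m + 1 := by omega
      simp [this]

-- A's loop, seen at the compare point l = k, r = n - k with the true running
-- sums, terminates with some true iff the gap at K = (n-1)//2 is positive
theorem aloop_closed (s : List Int)
    (hmono : ∀ (p q : Nat) (_ : p < s.length) (hq : q < s.length), p ≤ q → s[p]'(by omega) ≤ s[q]'hq) :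
    ∀ (m k : Nat), (s.length - 1) / 2 - k ≤ m → 1 ≤ k → 2 * k ≤ s.length - 1 →
      aloop s (s.length : Int) (k : Int) ((s.length : Int) - k) (preS s k) (sufS s k)
        = (if sufS s ((s.length - 1) / 2) > preS s ((s.length - 1) / 2) then some true else none) := by
  intro m
  induction m with
  | zero =>
    intro k hm h1 h2
    have hK : k = (s.length - 1) / 2 := by omega
    have hn : 2 * k + 1 ≤ s.length := by omega
    by_cases hc : sufS s k > preS s k
    · rw [aloop, dif_pos (by omega : (k : Int) < (s.length : Int) - k),
          if_pos ⟨by omega, hc⟩, if_pos (hK ▸ hc)]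
    · rw [if_neg (hK ▸ hc)]
      rw [aloop, dif_pos (by omega : (k : Int) < (s.length : Int) - k),
          if_neg (fun h => hc h.2),
          if_neg (by omega : ¬ (k : Int) + 1 ≤ (s.length : Int) - ((s.length : Int) - k))]
      have hend : 2 * k + 2 ≥ s.length := by
        have h1' : (s.length - 1) / 2 * 2 ≤ s.length - 1 := Nat.div_mul_le_self _ 2
        have h2' : s.length - 1 < 2 * ((s.length - 1) / 2 + 1) := Nat.lt_mul_div_succ _ (by omega)
        omega
      rcases Nat.eq_or_lt_of_le hn with heq | hlt
      · rw [aloop, dif_neg (by omega : ¬ (k : Int) < (s.length : Int) - k - 1)]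
      · rw [aloop, dif_pos (by omega : (k : Int) < (s.length : Int) - k - 1),
            if_neg (fun h => absurd h.1 (by omega)),
            if_pos (by omega : (k : Int) + 1 ≤ (s.length : Int) - ((s.length : Int) - k - 1)),
            aloop, dif_neg (by omega : ¬ (k : Int) + 1 < (s.length : Int) - k - 1)]
  | succ m ih =>
    intro k hm h1 h2
    by_cases hK : k = (s.length - 1) / 2
    · -- terminal case: same argument as with zero fuel
      clear ih
      have hn : 2 * k + 1 ≤ s.length := by omega
      by_cases hc : sufS s k > preS s k
      · rw [aloop, dif_pos (by omega : (k : Int) < (s.length : Int) - k),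
            if_pos ⟨by omega, hc⟩, if_pos (hK ▸ hc)]
      · rw [if_neg (hK ▸ hc)]
        rw [aloop, dif_pos (by omega : (k : Int) < (s.length : Int) - k),
            if_neg (fun h => hc h.2),
            if_neg (by omega : ¬ (k : Int) + 1 ≤ (s.length : Int) - ((s.length : Int) - k))]
        have hend : 2 * k + 2 ≥ s.length := by
          have h1' : (s.length - 1) / 2 * 2 ≤ s.length - 1 := Nat.div_mul_le_self _ 2
          have h2' : s.length - 1 < 2 * ((s.length - 1) / 2 + 1) := Nat.lt_mul_div_succ _ (by omega)
          omega
        rcases Nat.eq_or_lt_of_le hn with heq | hlt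
        · rw [aloop, dif_neg (by omega : ¬ (k : Int) < (s.length : Int) - k - 1)]
        · rw [aloop, dif_pos (by omega : (k : Int) < (s.length : Int) - k - 1),
              if_neg (fun h => absurd h.1 (by omega)),
              if_pos (by omega : (k : Int) + 1 ≤ (s.length : Int) - ((s.length : Int) - k - 1)),
              aloop, dif_neg (by omega : ¬ (k : Int) + 1 < (s.length : Int) - k - 1)]
    · -- k < K: return true now (the gap only grows up to K), or step to k+1
      have hKb : (s.length - 1) / 2 * 2 ≤ s.length - 1 := Nat.div_mul_le_self _ 2
      have hkK : k < (s.length - 1) / 2 := by omega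
      have hn : 2 * k + 3 ≤ s.length := by omega
      by_cases hc : sufS s k > preS s k
      · have hgap := diff_mono s k ((s.length - 1) / 2) hmono (by omega) (by omega)
        rw [aloop, dif_pos (by omega : (k : Int) < (s.length : Int) - k),
            if_pos ⟨by omega, hc⟩, if_pos (by omega)]
      · rw [aloop, dif_pos (by omega : (k : Int) < (s.length : Int) - k),
            if_neg (fun h => hc h.2),
            if_neg (by omega : ¬ (k : Int) + 1 ≤ (s.length : Int) - ((s.length : Int) - k)),
            aloop, dif_pos (by omega : (k : Int) < (s.length : Int) - k - 1),
            if_neg (fun h => absurd h.1 (by omega)),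
            if_pos (by omega : (k : Int) + 1 ≤ (s.length : Int) - ((s.length : Int) - k - 1))]
        have hp : k + 1 < s.length := by omega
        have hq : s.length - k - 1 < s.length := by omega
        have hsufs : sufS s k + PySem.List.pyGetD s ((s.length : Int) - k - 1) 0 = sufS s (k + 1) := by
          rw [pgI s _ (s.length - k - 1) (by omega) hq]
          unfold sufS
          rw [drop_succ_eq s k hn, List.sum_cons]
          omega
        have hpres : preS s k + PySem.List.pyGetD s ((k : Int) + 1) 0 = preS s (k + 1) := by
          rw [pgI s _ (k + 1) (by omega) hp]
          unfold preS
          rw [List.sum_take_succ s (k + 1) hp]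
        rw [hpres, hsufs,
            show ((s.length : Int) - k - 1) = (s.length : Int) - ((k + 1 : Nat) : Int) from by omega,
            show ((k : Int) + 1) = ((k + 1 : Nat) : Int) from by omega]
        exact ih (k + 1) (by omega) (by omega) (by omega)

theorem is_pos_spec : Claim_equal_is_pos := by
  intro x _hdom hpre
  unfold Spec_is_pos is_pos is_pos_alt
  simp only []
  set s := PySem.List.sorted x (fun v => v) false with hs
  have hlen : 1 ≤ s.length := by
    rw [hs, PySem.List.length_sorted]
    cases x with
    | nil => exact absurd rfl hpre
    | cons a t => simp
  have hmono : ∀ (p q : Nat) (_ : p < s.length) (hq : q < s.length), p ≤ q → s[p]'(by omega) ≤ s[q]'hq := by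
    intro p q hp hq hpq
    exact PySem.List.sorted_id_getElem_mono x hpq hq
  rw [fdK s.length hlen]
  set K : Nat := (s.length - 1) / 2 with hKdef
  have hKb : K * 2 ≤ s.length - 1 := Nat.div_mul_le_self _ 2
  have hKb2 : s.length - 1 < 2 * (K + 1) := Nat.lt_mul_div_succ _ (by omega)
  by_cases h3 : 3 ≤ s.length
  · have hK1 : 1 ≤ K := by omega
    have h0 : 0 < s.length := by omega
    have h1 : 1 < s.length := by omega
    have hq : s.length - 1 < s.length := by omega
    -- first iteration of A: l 0→1, reaching the compare point k = 1
    rw [aloop, dif_pos (by omega : (0 : Int) < (s.length : Int) - 1),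
        if_neg (fun h => absurd h.1 (by omega)),
        if_pos (by omega : (0 : Int) + 1 ≤ (s.length : Int) - ((s.length : Int) - 1)), zero_add]
    have hpre1 : PySem.List.pyGetD s 0 0 + PySem.List.pyGetD s 1 0 = preS s 1 := by
      rw [pgI s 0 0 (by omega) h0, pgI s 1 1 (by omega) h1]
      unfold preS
      rw [List.sum_take_succ s 1 h1, List.sum_take_succ s 0 h0]
      simp
    have hsuf1 : PySem.List.pyGetD s ((s.length : Int) - 1) 0 = sufS s 1 := by
      rw [pgI s _ (s.length - 1) (by omega) hq]
      unfold sufS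
      rw [List.drop_eq_getElem_cons hq,
          show s.length - 1 + 1 = s.length from by omega, List.drop_length]
      simp
    rw [hpre1, hsuf1]
    have hcl := aloop_closed s hmono (K - 1) 1 (by omega) (by omega) (by omega)
    simp only [Nat.cast_one] at hcl
    rw [hcl]
    -- B's closed form agrees with the gap at K
    have hifc : (1 ≤ (K : Int) ∧ (PySem.List.slice s (some (-(K : Int))) none).sum > (PySem.List.slice s none (some ((K : Int) + 1))).sum)
        ↔ sufS s K > preS s K := by
      rw [PySem.List.slice_from_neg_natCast s K (by omega),
          show ((K : Int) + 1) = ((K + 1 : Nat) : Int) from by omega,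
          PySem.List.slice_to_natCast]
      unfold sufS preS
      exact ⟨fun h => h.2, fun h => ⟨by omega, h⟩⟩
    by_cases hc : sufS s K > preS s K
    · rw [if_pos hc, if_pos (hifc.mpr hc)]
    · rw [if_neg hc, if_neg (fun h => hc (hifc.mp h))]
  · -- n = 1 or 2: A's loop ends without a comparison; B's guard 1 ≤ K fails
    have hK0 : K = 0 := by omega
    have hB : ¬ (1 ≤ (K : Int) ∧ (PySem.List.slice s (some (-(K : Int))) none).sum > (PySem.List.slice s none (some ((K : Int) + 1))).sum) := by
      intro h
      have := h.1
      omega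
    rw [if_neg hB]
    rcases Nat.eq_or_lt_of_le hlen with h1 | h2
    · rw [aloop, dif_neg (by omega : ¬ (0 : Int) < (s.length : Int) - 1)]
    · rw [aloop, dif_pos (by omega : (0 : Int) < (s.length : Int) - 1),
          if_neg (fun h => absurd h.1 (by omega)),
          if_pos (by omega : (0 : Int) + 1 ≤ (s.length : Int) - ((s.length : Int) - 1)), zero_add,
          aloop, dif_neg (by omega : ¬ (1 : Int) < (s.length : Int) - 1)]

theorem is_pos_raises : Claim_raises_is_pos := by
  unfold Claim_raises_is_pos
  exact ⟨fun x _ h hp => hp h, by decide⟩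

-- witness self-check read off is_pos_raises: B's value at the raise witness
theorem pvRaiseWitness_ok : is_pos_alt pvRaiseWitness_is_pos = pvRaiseWitnessOut_is_pos :=
  is_pos_raises.2.2.2
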